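-- pv_equiv track=rewrite | github.com/killeress/PatchCore-AI-Detection | capi_database.py | parse_ric_judgment
-- ===== SOURCE A (Python) =====
-- def parse_ric_judgment(datastr: str) -> str:
--     """
--     解析 DATASTR 欄位判定 RIC 結果
--     例: "WGF50500,OK;STANDARD,NG;R0F00000,NG;W0F00000,OK;4;"
--     任一項含 NG → 回傳 "NG"，否則 "OK"
--     """
--     if not datastr:
--         return "OK"
--     parts = datastr.strip().rstrip(";").split(";")
--     for part in parts:
--         part = part.strip()
--         if not part:
--             continue
--         # 最後一項可能純數字 (計數)，跳過
--         if part.isdigit():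
--             continue
--         if "," in part:
--             _, result = part.rsplit(",", 1)
--             if result.strip().upper() == "NG":
--                 return "NG"
--     return "OK"
-- ===== SOURCE B (Python) =====
-- def parse_ric_judgment(datastr: str) -> str:
--     if not datastr:
--         return "OK"
--     seen_comma, field = False, ""
--     for ch in datastr.strip().rstrip(";"):
--         if ch == ";":
--             if seen_comma and field.strip().upper() == "NG":
--                 return "NG"
--             seen_comma, field = False, ""
--         elif ch == ",":
--             seen_comma, field = True, ""
--         else:
--             field += ch
--     if seen_comma and field.strip().upper() == "NG":
--         return "NG"
--     return "OK"
-- ===== Notes on version B (the rewrite author's own statement) =====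
-- stated objective: alternative
-- what changed: A splits the string into semicolon-separated parts and runs rsplit/strip tests on each part; B never splits: after the same strip preprocessing it runs a single left-to-right character automaton whose state is (seen_comma, text-after-last-comma), checking for NG at each separator and at the end.
import Mathlib
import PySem

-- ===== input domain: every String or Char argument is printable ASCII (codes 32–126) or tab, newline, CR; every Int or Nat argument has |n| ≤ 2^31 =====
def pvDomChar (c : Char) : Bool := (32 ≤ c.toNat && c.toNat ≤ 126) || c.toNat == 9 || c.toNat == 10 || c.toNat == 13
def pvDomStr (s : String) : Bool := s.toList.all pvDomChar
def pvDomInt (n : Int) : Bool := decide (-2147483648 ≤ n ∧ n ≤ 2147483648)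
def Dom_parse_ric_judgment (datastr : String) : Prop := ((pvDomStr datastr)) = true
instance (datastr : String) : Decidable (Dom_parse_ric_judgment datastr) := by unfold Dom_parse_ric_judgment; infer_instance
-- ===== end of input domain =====

-- B replaces A's split-into-parts loop (with its rsplit per part) by a single left-to-right
-- character automaton over the same preprocessed string: no split, no per-part rsplit (alternative).

-- shared helper: the check `x.strip().upper() == "NG"` both Pythons perform — exact
def chkNG (a : List Char) : Bool := PySem.Chars.upper (PySem.Chars.strip a) == "NG".toList

-- shared hand-port of s.rstrip(";") (PySem has no one-sided rstrip(chars)): drop trailing ';' — exact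
def pyRstripSemi (s : List Char) : List Char := (s.reverse.dropWhile (· == ';')).reverse

-- ===== PORT A =====
-- hand-port of part.rsplit(",", 1) (exact when ',' ∈ part, the only case A uses it):
-- split at the LAST ',': the tail is the longest comma-free suffix
def rsplitLastComma (s : List Char) : List Char × List Char :=
  let r := s.reverse.takeWhile (· ≠ ',')
  ((s.reverse.drop (r.length + 1)).reverse, r.reverse)

def parseLoopA : List (List Char) → String
  | [] => "OK"
  | part :: rest =>
    let part := PySem.Chars.strip part
    if part.isEmpty then parseLoopA rest
    else if PySem.Chars.strIsdigit part then parseLoopA rest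
    else if PySem.Chars.isIn [','] part then
      if chkNG (rsplitLastComma part).2 then "NG" else parseLoopA rest
    else parseLoopA rest

def parse_ric_judgment (datastr : String) : String :=
  if datastr.toList.isEmpty then "OK"
  else parseLoopA (PySem.Chars.splitOn (pyRstripSemi (PySem.Chars.strip datastr.toList)) [';'])

-- ===== PORT B =====
-- B's for-loop over the characters: state = (seen_comma, field)
def scanB : List Char → Bool → List Char → String
  | [], b, acc => if b && chkNG acc then "NG" else "OK"
  | c :: rest, b, acc =>
    if c = ';' then
      if b && chkNG acc then "NG" else scanB rest false []
    else if c = ',' then scanB rest true []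
    else scanB rest b (acc ++ [c])

def parse_ric_judgment_alt (datastr : String) : String :=
  if datastr.toList.isEmpty then "OK"
  else scanB (pyRstripSemi (PySem.Chars.strip datastr.toList)) false []

-- ===== PRECONDITION & SPEC =====
def Spec_parse_ric_judgment (datastr : String) (out : String) : Prop := out = parse_ric_judgment_alt datastr
instance (datastr : String) (out : String) : Decidable (Spec_parse_ric_judgment datastr out) := by unfold Spec_parse_ric_judgment; infer_instance

-- ===== CLAIM (what is proved, stated in full; the proofs are below) =====
def Claim_equal_parse_ric_judgment : Prop := ∀ (datastr : String), Dom_parse_ric_judgment datastr → Spec_parse_ric_judgment datastr (parse_ric_judgment datastr)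

-- ===== LEMMAS AND PROOFS =====

-- the tail after the LAST comma, if any (proof-only device)
def tailAfter : List Char → Option (List Char)
  | [] => none
  | c :: rest =>
    match tailAfter rest with
    | some t => some t
    | none => if c = ',' then some rest else none

-- the per-segment truth both programs decide
def segNG (seg : List Char) : Bool :=
  match tailAfter seg with
  | some t => chkNG t
  | none => false

-- B's in-segment state transition (proof-only)
def procSeg : List Char → Bool → List Char → Bool × List Char
  | [], b, acc => (b, acc)
  | c :: rest, b, acc =>
    if c = ',' then procSeg rest true [] else procSeg rest b (acc ++ [c])

lemma procSeg_eq (seg : List Char) : ∀ b acc,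
    procSeg seg b acc = match tailAfter seg with
      | some t => (true, t)
      | none => (b, acc ++ seg) := by
  induction seg with
  | nil => intro b acc; simp [procSeg, tailAfter]
  | cons c rest ih =>
    intro b acc
    by_cases hc : c = ','
    · subst hc
      simp only [procSeg, tailAfter, ih]
      cases h : tailAfter rest <;> simp
    · simp only [procSeg, if_neg hc, tailAfter, ih]
      cases h : tailAfter rest
      · simp
      · simp

lemma segNG_procSeg (seg : List Char) :
    ((procSeg seg false []).1 && chkNG (procSeg seg false []).2) = segNG seg := by
  rw [procSeg_eq]
  unfold segNG
  cases h : tailAfter seg <;> simp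

-- PySem.Chars.splitOn with a single-char separator is List.splitOnP
lemma splitOn_go_eq (c : Char) : ∀ (fuel : Nat) (l cur : List Char) (acc : List (List Char)),
    l.length ≤ fuel →
    PySem.Chars.splitOn.go [c] fuel l cur acc
      = acc.reverse ++ (List.splitOnP (· == c) l).modifyHead (cur.reverse ++ ·) := by
  intro fuel
  induction fuel with
  | zero =>
    intro l cur acc hl
    have : l = [] := List.length_eq_zero_iff.mp (Nat.le_zero.mp hl)
    subst this
    simp [PySem.Chars.splitOn.go, List.splitOnP_nil]
  | succ n ih =>
    intro l cur acc hl
    cases l with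
    | nil => simp [PySem.Chars.splitOn.go, List.splitOnP_nil]
    | cons c' rest =>
      obtain ⟨h, t, he⟩ := List.exists_cons_of_ne_nil (List.splitOnP_ne_nil (· == c) rest)
      by_cases hc : c = c'
      · subst hc
        have hp : List.isPrefixOf [c] (c :: rest) = true := by
          simp [List.isPrefixOf]
        simp only [PySem.Chars.splitOn.go, hp]
        rw [ih _ _ _ (by simpa using Nat.le_of_succ_le_succ hl)]
        simp [List.splitOnP_cons, he]
      · have hp : List.isPrefixOf [c] (c' :: rest) = false := by
          simp [List.isPrefixOf, hc]
        have hcc : ((c' == c) = false) := beq_eq_false_iff_ne.mpr (Ne.symm hc)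
        simp only [PySem.Chars.splitOn.go, hp]
        rw [ih rest (c' :: cur) acc (by simpa using Nat.le_of_succ_le_succ hl)]
        simp [List.splitOnP_cons, hcc, he]

lemma splitOn_eq_splitOnP (s : List Char) (c : Char) :
    PySem.Chars.splitOn s [c] = List.splitOnP (· == c) s := by
  unfold PySem.Chars.splitOn
  rw [splitOn_go_eq c (s.length + 1) s [] [] (Nat.le_succ _)]
  obtain ⟨h, t, he⟩ := List.exists_cons_of_ne_nil (List.splitOnP_ne_nil (· == c) s)
  simp [he]

-- B's scan computes `any segNG` over the ;-segments
lemma scanB_eq (s : List Char) : ∀ b acc,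
    scanB s b acc =
      (let segs := List.splitOnP (· == ';') s
       if ((procSeg segs.head! b acc).1 && chkNG (procSeg segs.head! b acc).2) then "NG"
       else if segs.tail.any segNG then "NG" else "OK") := by
  induction s with
  | nil =>
    intro b acc
    simp [scanB, List.splitOnP_nil, procSeg]
  | cons c rest ih =>
    intro b acc
    obtain ⟨h, t, he⟩ := List.exists_cons_of_ne_nil (List.splitOnP_ne_nil (· == ';') rest)
    by_cases hc : c = ';'
    · subst hc
      have hL : scanB (';' :: rest) b acc
          = if (b && chkNG acc) then "NG" else scanB rest false [] := by
        simp [scanB]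
      have hsp : List.splitOnP (· == ';') (';' :: rest) = [] :: h :: t := by
        rw [List.splitOnP_cons]
        simp [he]
      rw [hL, ih, hsp]
      simp only [he, List.head!_cons, List.tail_cons, List.any_cons, segNG_procSeg]
      by_cases hb : (b && chkNG acc) = true
      · simp [hb, procSeg]
      · by_cases hsg : segNG h = true <;> simp [hb, hsg, procSeg]
    · by_cases hc2 : c = ','
      · subst hc2
        simp only [scanB, if_neg hc, List.splitOnP_cons]
        rw [ih]
        simp [he, procSeg]
      · simp only [scanB, if_neg hc, if_neg hc2, List.splitOnP_cons]
        rw [ih]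
        simp [he, hc, hc2, procSeg]

-- A's loop computes `any PA` over the parts
def PA (part : List Char) : Bool :=
  if (PySem.Chars.strip part).isEmpty then false
  else if PySem.Chars.strIsdigit (PySem.Chars.strip part) then false
  else if PySem.Chars.isIn [','] (PySem.Chars.strip part) then
    chkNG (rsplitLastComma (PySem.Chars.strip part)).2
  else false

lemma parseLoopA_eq (parts : List (List Char)) :
    parseLoopA parts = if parts.any PA then "NG" else "OK" := by
  induction parts with
  | nil => simp [parseLoopA]
  | cons p rest ih =>
    unfold parseLoopA
    rw [ih]
    simp only [List.any_cons]
    by_cases h1 : (PySem.Chars.strip p).isEmpty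
    · have hp : PA p = false := by simp [PA, h1]
      simp [h1, hp]
    · by_cases h2 : PySem.Chars.strIsdigit (PySem.Chars.strip p)
      · have hp : PA p = false := by simp [PA, h1, h2]
        simp [h1, h2, hp]
      · by_cases h3 : PySem.Chars.isIn [','] (PySem.Chars.strip p)
        · by_cases h4 : chkNG (rsplitLastComma (PySem.Chars.strip p)).2
          · have hp : PA p = true := by simp [PA, h1, h2, h3, h4]
            simp [h1, h2, h3, h4, hp]
          · have hp : PA p = false := by simp [PA, h1, h2, h3, h4]
            simp [h1, h2, h3, h4, hp]
        · have hp : PA p = false := by simp [PA, h1, h2, h3]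
          simp [h1, h2, h3, hp]

-- ===== facts about strip / tailAfter =====

lemma mem_dropWhile_of_not {p : Char → Bool} {a : Char} (ha : p a = false) (l : List Char) :
    a ∈ l.dropWhile p ↔ a ∈ l := by
  induction l with
  | nil => simp
  | cons c rest ih =>
    by_cases hc : p c = true
    · rw [List.dropWhile_cons_of_pos hc, ih]
      constructor
      · exact fun h => List.mem_cons_of_mem _ h
      · intro h
        rcases List.mem_cons.mp h with h | h
        · subst h; rw [ha] at hc; exact absurd hc (by simp)
        · exact h
    · rw [List.dropWhile_cons_of_neg hc]

lemma mem_strip_comma (s : List Char) : ',' ∈ PySem.Chars.strip s ↔ ',' ∈ s := by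
  have hsp : PySem.Chars.isspace ',' = false := by decide
  unfold PySem.Chars.strip PySem.Chars.lstrip PySem.Chars.rstrip
  rw [List.mem_reverse, mem_dropWhile_of_not hsp, List.mem_reverse, mem_dropWhile_of_not hsp]

lemma tailAfter_none_iff (s : List Char) : tailAfter s = none ↔ ',' ∉ s := by
  induction s with
  | nil => simp [tailAfter]
  | cons c rest ih =>
    unfold tailAfter
    cases h : tailAfter rest with
    | some t =>
      have hmem : ',' ∈ rest := by
        by_contra hn
        rw [ih.mpr hn] at h
        cases h
      simp [List.mem_cons, hmem]
    | none =>
      by_cases hc : c = ','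
      · simp [hc]
      · have hc' : ¬(',' = c) := fun e => hc e.symm
        simp [hc, hc', ih.mp h]

lemma tailAfter_spec {s t : List Char} (h : tailAfter s = some t) :
    ∃ pre, s = pre ++ ',' :: t ∧ ',' ∉ t := by
  induction s with
  | nil => simp [tailAfter] at h
  | cons c rest ih =>
    unfold tailAfter at h
    cases hr : tailAfter rest with
    | some t' =>
      rw [hr] at h
      obtain ⟨pre, hpre, hnot⟩ := ih (by rw [hr]; exact h)
      exact ⟨c :: pre, by simp [hpre], hnot⟩
    | none =>
      rw [hr] at h
      by_cases hc : c = ','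
      · subst hc
        simp at h
        subst h
        exact ⟨[], rfl, (tailAfter_none_iff rest).mp hr⟩
      · simp [hc] at h

lemma tailAfter_append_last {pre t : List Char} (ht : ',' ∉ t) :
    tailAfter (pre ++ ',' :: t) = some t := by
  induction pre with
  | nil => simp [tailAfter, (tailAfter_none_iff t).mpr ht]
  | cons c pre ih => simp [tailAfter, ih]

-- dropping an all-space prefix does not change tailAfter
lemma tailAfter_space_prefix {w : List Char} (hw : ∀ a ∈ w, PySem.Chars.isspace a = true)
    (x : List Char) : tailAfter (w ++ x) = tailAfter x := by
  induction w with
  | nil => simp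
  | cons c w ih =>
    have hc : c ≠ ',' := by
      intro h; subst h
      have := hw ',' (by simp)
      simp [PySem.Chars.isspace] at this
    simp only [List.cons_append, tailAfter, ih (fun a ha => hw a (by simp [ha]))]
    cases h : tailAfter x <;> simp [hc]

lemma rstrip_append_comma (pre t : List Char) :
    PySem.Chars.rstrip (pre ++ ',' :: t) = pre ++ ',' :: PySem.Chars.rstrip t := by
  unfold PySem.Chars.rstrip
  rw [show (pre ++ ',' :: t).reverse = t.reverse ++ ',' :: pre.reverse by simp,
      List.dropWhile_append]
  by_cases h : (List.dropWhile PySem.Chars.isspace t.reverse).isEmpty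
  · rw [if_pos h]
    rw [List.isEmpty_iff.mp h]
    simp [PySem.Chars.isspace]
  · rw [if_neg (by simpa using h)]
    simp

lemma mem_rstrip_of_mem_imp {a : Char} {t : List Char} (h : a ∈ PySem.Chars.rstrip t) : a ∈ t := by
  unfold PySem.Chars.rstrip at h
  rw [List.mem_reverse] at h
  exact List.mem_reverse.mp ((List.dropWhile_sublist _).mem h)

lemma head_dropWhile_false {p : Char → Bool} {l : List Char} {c : Char} {x : List Char}
    (h : l.dropWhile p = c :: x) : p c = false := by
  induction l with
  | nil => simp at h
  | cons a rest ih =>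
    by_cases ha : p a = true
    · rw [List.dropWhile_cons_of_pos ha] at h
      exact ih h
    · rw [List.dropWhile_cons_of_neg (by simpa using ha)] at h
      cases h
      simpa using ha

lemma rstrip_append (u v : List Char) (h : PySem.Chars.rstrip v ≠ []) :
    PySem.Chars.rstrip (u ++ v) = u ++ PySem.Chars.rstrip v := by
  unfold PySem.Chars.rstrip at *
  rw [List.reverse_append, List.dropWhile_append]
  rw [if_neg]
  · simp
  · rw [List.isEmpty_iff]
    intro hnil
    exact h (by rw [hnil]; rfl)

lemma rstrip_cons_not_space {c : Char} (hc : PySem.Chars.isspace c = false) (x : List Char) :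
    ∃ y, PySem.Chars.rstrip (c :: x) = c :: y := by
  unfold PySem.Chars.rstrip
  rw [show (c :: x).reverse = x.reverse ++ [c] by simp, List.dropWhile_append]
  by_cases h : (List.dropWhile PySem.Chars.isspace x.reverse).isEmpty
  · rw [if_pos h]
    exact ⟨[], by simp [hc]⟩
  · rw [if_neg h]
    exact ⟨(List.dropWhile PySem.Chars.isspace x.reverse).reverse, by simp⟩

lemma dropWhile_idem (p : Char → Bool) (l : List Char) :
    List.dropWhile p (List.dropWhile p l) = List.dropWhile p l := by
  cases h : List.dropWhile p l with
  | nil => simp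
  | cons a as =>
    have ha := head_dropWhile_false h
    rw [List.dropWhile_cons_of_neg (by simp [ha])]

lemma rstrip_rstrip (v : List Char) :
    PySem.Chars.rstrip (PySem.Chars.rstrip v) = PySem.Chars.rstrip v := by
  unfold PySem.Chars.rstrip
  rw [List.reverse_reverse, dropWhile_idem]

-- strip(rstrip t) = strip t
lemma strip_rstrip (t : List Char) :
    PySem.Chars.strip (PySem.Chars.rstrip t) = PySem.Chars.strip t := by
  unfold PySem.Chars.strip PySem.Chars.lstrip
  cases hl : List.dropWhile PySem.Chars.isspace t with
  | nil =>
    -- t is all spaces, so rstrip t = []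
    have hall : ∀ a ∈ t, PySem.Chars.isspace a = true := by
      intro a ha
      by_contra hna
      have := (List.dropWhile_eq_nil_iff).mp hl a ha
      exact hna this
    have : PySem.Chars.rstrip t = [] := by
      unfold PySem.Chars.rstrip
      rw [List.dropWhile_eq_nil_iff.mpr (fun a ha => hall a (List.mem_reverse.mp ha))]
      rfl
    rw [this]
    rfl
  | cons c x =>
    have hc : PySem.Chars.isspace c = false := head_dropWhile_false hl
    have hdecomp : t = t.takeWhile PySem.Chars.isspace ++ c :: x := by
      conv_lhs => rw [← List.takeWhile_append_dropWhile (p := PySem.Chars.isspace) (l := t)]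
      rw [hl]
    obtain ⟨y, hy⟩ := rstrip_cons_not_space hc x
    have hrt : PySem.Chars.rstrip t = t.takeWhile PySem.Chars.isspace ++ c :: y := by
      conv_lhs => rw [hdecomp]
      rw [rstrip_append _ _ (by rw [hy]; simp), hy]
    rw [hrt, List.dropWhile_append]
    rw [if_pos (by
      rw [List.isEmpty_iff, List.dropWhile_eq_nil_iff]
      intro a ha
      exact List.mem_takeWhile_imp ha)]
    rw [List.dropWhile_cons_of_neg (by simp [hc]), ← hy, rstrip_rstrip]

-- chkNG is invariant under rstrip of its argument
lemma chkNG_rstrip (t : List Char) : chkNG (PySem.Chars.rstrip t) = chkNG t := by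
  unfold chkNG
  rw [strip_rstrip]

-- the rsplit tail is the tailAfter, for the stripped part
lemma rsplit_tail_eq {s t : List Char} (h : tailAfter s = some t) :
    (rsplitLastComma s).2 = t := by
  obtain ⟨pre, hpre, hnot⟩ := tailAfter_spec h
  subst hpre
  unfold rsplitLastComma
  rw [show (pre ++ ',' :: t).reverse = t.reverse ++ ',' :: pre.reverse by simp,
      List.takeWhile_append]
  rw [if_pos]
  · simp
  · rw [List.takeWhile_eq_self_iff.mpr]
    intro a ha
    simp only [decide_eq_true_eq, ne_eq]
    intro hEq
    exact hnot (by rw [← hEq]; exact List.mem_reverse.mp ha)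

-- tailAfter of the stripped part is the rstrip of tailAfter of the part
lemma tailAfter_strip {s t : List Char} (h : tailAfter s = some t) :
    tailAfter (PySem.Chars.strip s) = some (PySem.Chars.rstrip t) := by
  unfold PySem.Chars.strip PySem.Chars.lstrip
  have hsplit : s = s.takeWhile PySem.Chars.isspace ++ s.dropWhile PySem.Chars.isspace :=
    (List.takeWhile_append_dropWhile).symm
  have hts : tailAfter (s.dropWhile PySem.Chars.isspace) = some t := by
    rw [← tailAfter_space_prefix (w := s.takeWhile PySem.Chars.isspace)
      (fun a ha => List.mem_takeWhile_imp ha) (s.dropWhile PySem.Chars.isspace), ← hsplit]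
    exact h
  obtain ⟨pre, hpre, hnot⟩ := tailAfter_spec hts
  rw [hpre, rstrip_append_comma]
  exact tailAfter_append_last (fun hm => hnot (mem_rstrip_of_mem_imp hm))

-- A's per-part test equals B's per-segment truth
lemma PA_eq_segNG (part : List Char) : PA part = segNG part := by
  unfold PA segNG
  cases h : tailAfter part with
  | none =>
    have hnc : ',' ∉ part := (tailAfter_none_iff part).mp h
    have hnc' : ',' ∉ PySem.Chars.strip part := fun hm => hnc ((mem_strip_comma part).mp hm)
    have hIn : PySem.Chars.isIn [','] (PySem.Chars.strip part) = false := by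
      rw [PySem.Chars.isIn_eq_false_iff]
      intro hinf
      exact hnc' (hinf.subset (by simp))
    simp [hIn]
  | some t =>
    have hc : ',' ∈ part := by
      by_contra hn
      rw [(tailAfter_none_iff part).mpr hn] at h
      cases h
    have hc' : ',' ∈ PySem.Chars.strip part := (mem_strip_comma part).mpr hc
    have hne : ¬ (PySem.Chars.strip part).isEmpty := by
      simp [List.isEmpty_iff]
      exact List.ne_nil_of_mem hc'
    have hdig : PySem.Chars.strIsdigit (PySem.Chars.strip part) = false := by
      by_contra hd
      simp only [Bool.not_eq_false] at hd
      simp [PySem.Chars.strIsdigit, List.all_eq_true] at hd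
      have := hd.2 ',' hc'
      simp [PySem.Chars.isdigit] at this
    have hIn : PySem.Chars.isIn [','] (PySem.Chars.strip part) = true := by
      rw [PySem.Chars.isIn_iff_infix]
      obtain ⟨u, v, huv⟩ := List.append_of_mem hc'
      exact ⟨u, v, by simp [huv]⟩
    have hta := tailAfter_strip h
    rw [rsplit_tail_eq hta]
    simp [hne, hdig, hIn, chkNG_rstrip]

-- ===== VERDICT (by name: the statement is the Claim_ definition above) =====
theorem parse_ric_judgment_spec : Claim_equal_parse_ric_judgment := by
  intro datastr _
  unfold Spec_parse_ric_judgment parse_ric_judgment parse_ric_judgment_alt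
  by_cases h : datastr.toList.isEmpty
  · simp [h]
  · simp only [h]
    rw [parseLoopA_eq, scanB_eq, splitOn_eq_splitOnP]
    obtain ⟨hd, tl, he⟩ := List.exists_cons_of_ne_nil
      (List.splitOnP_ne_nil (· == ';') (pyRstripSemi (PySem.Chars.strip datastr.toList)))
    simp only [he, List.head!_cons, List.tail_cons, List.any_cons, segNG_procSeg]
    simp [PA_eq_segNG]
    by_cases h1 : segNG hd = true <;> simp [h1]
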